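-- pv_equiv track=rewrite | github.com/mbardavid/luna | artifacts/backups/workspace-runtime-cutover-20260306T013952Z/workspace/heartbeat-v3/scripts/heartbeat-v3.py | resolve_agent_name
-- ===== SOURCE A (Python) =====
-- def resolve_agent_name(uuid_str: str, mapping: dict) -> str:
--     """Resolve MC agent UUID to OpenClaw agent name."""
--     if not uuid_str:
--         return "luan"  # Default worker
--     if uuid_str in mapping:
--         return mapping[uuid_str]
--     for full_uuid, name in mapping.items():
--         if full_uuid.startswith(uuid_str):
--             return name
--     return "luan"  # Fallback
-- ===== SOURCE B (Python) =====
-- def resolve_agent_name(uuid_str: str, mapping: dict) -> str: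
--     """Resolve MC agent UUID to OpenClaw agent name (ranked-candidate selection)."""
--     if not uuid_str:
--         return "luan"
--     candidates = [((0 if full_uuid == uuid_str else 1), i, name)
--                   for i, (full_uuid, name) in enumerate(mapping.items())
--                   if full_uuid.startswith(uuid_str)]
--     if not candidates:
--         return "luan"
--     return min(candidates, key=lambda t: (t[0], t[1]))[2]
-- ===== Notes on version B (the rewrite author's own statement) =====
-- stated objective: alternative
-- what changed: Replaces the dict-membership lookup plus separate prefix scan with a candidate-ranking pass: every prefix match becomes a (rank, index, name) triple with rank 0 for the exact key, and the lexicographic minimum of the candidates (or the default) is returned.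
import Mathlib
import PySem

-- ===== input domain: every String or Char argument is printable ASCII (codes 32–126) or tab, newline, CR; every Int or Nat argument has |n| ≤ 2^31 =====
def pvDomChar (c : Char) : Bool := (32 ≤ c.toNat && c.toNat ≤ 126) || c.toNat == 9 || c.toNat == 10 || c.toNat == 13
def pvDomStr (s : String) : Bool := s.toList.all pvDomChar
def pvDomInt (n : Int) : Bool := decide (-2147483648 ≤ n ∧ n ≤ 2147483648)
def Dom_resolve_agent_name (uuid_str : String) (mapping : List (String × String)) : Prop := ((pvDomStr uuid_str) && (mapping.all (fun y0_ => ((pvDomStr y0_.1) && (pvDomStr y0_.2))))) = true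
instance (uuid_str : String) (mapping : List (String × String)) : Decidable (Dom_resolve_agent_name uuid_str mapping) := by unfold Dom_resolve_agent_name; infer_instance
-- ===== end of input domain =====

-- B replaces A's dict-membership lookup plus separate prefix scan with one candidate-ranking pass: it collects every prefix match as a (rank, index, name) triple (rank 0 for the exact key) and returns the lexicographic minimum (alternative decomposition, same cost).


-- ===== PORT A =====
-- A: guard, dict membership lookup, then a separate prefix scan over the items.
def pyScanPrefix (u : String) : List (String × String) → String
  | [] => "luan"
  | (k, v) :: rest => if PySem.Str.startswith k u then v else pyScanPrefix u rest

def resolve_agent_name (uuid_str : String) (mapping : List (String × String)) : String :=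
  let d := PySem.Dict.ofList mapping
  if uuid_str = "" then "luan"
  else
    match PySem.Dict.get? d uuid_str with
    | some v => v
    | none => pyScanPrefix uuid_str d.items

-- ===== PORT B =====
-- B: collect (rank, index, name) candidates for every prefix match, then take the lexicographic minimum.
def resolve_agent_name_alt (uuid_str : String) (mapping : List (String × String)) : String :=
  if uuid_str = "" then "luan"
  else
    let candidates := (PySem.List.enumerate (PySem.Dict.ofList mapping).items).filterMap
      (fun p => if PySem.Str.startswith p.2.1 uuid_str
                then some ((if p.2.1 = uuid_str then (0 : Int) else 1), p.1, p.2.2)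
                else none)
    match PySem.List.min2? candidates (fun t => t.1) (fun t => t.2.1) with
    | some t => t.2.2
    | none => "luan"

-- ===== PRECONDITION & SPEC =====
def Spec_resolve_agent_name (uuid_str : String) (mapping : List (String × String)) (out : String) : Prop := out = resolve_agent_name_alt uuid_str mapping
instance (uuid_str : String) (mapping : List (String × String)) (out : String) : Decidable (Spec_resolve_agent_name uuid_str mapping out) := by unfold Spec_resolve_agent_name; infer_instance

-- ===== CLAIM (what is proved, stated in full; the proofs are below) =====
def Claim_equal_resolve_agent_name : Prop := ∀ (uuid_str : String) (mapping : List (String × String)), Dom_resolve_agent_name uuid_str mapping → Spec_resolve_agent_name uuid_str mapping (resolve_agent_name uuid_str mapping)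

-- ===== LEMMAS AND PROOFS =====

-- The fold step of min2? with keys (·.1) and (·.2.1), spelled out.
def mstep (acc : Option (Int × Int × String)) (x : Int × Int × String) : Option (Int × Int × String) :=
  match acc with
  | none => some x
  | some m => if (decide (x.1 < m.1) || !decide (m.1 < x.1) && decide (x.2.1 < m.2.1)) = true then some x else some m

theorem min2?_eq_foldl (xs : List (Int × Int × String)) :
    PySem.List.min2? xs (fun t => t.1) (fun t => t.2.1) = List.foldl mstep none xs := by
  unfold PySem.List.min2? mstep
  congr 1
  funext acc x
  cases acc <;> rfl

-- B's candidate list over a generic item list, enumerate starting at s.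
def cands (u : String) (l : List (String × String)) (s : Int) : List (Int × Int × String) :=
  (PySem.List.enumerate l s).filterMap
    (fun p => if PySem.Str.startswith p.2.1 u
              then some ((if p.2.1 = u then (0 : Int) else 1), p.1, p.2.2)
              else none)

theorem cands_cons (u k v : String) (l : List (String × String)) (s : Int) :
    cands u ((k, v) :: l) s =
      (if PySem.Str.startswith k u then [((if k = u then (0 : Int) else 1), s, v)] else []) ++ cands u l (s + 1) := by
  simp only [cands, PySem.List.enumerate_cons, List.filterMap_cons]
  split_ifs <;> simp

theorem startswith_self (k : String) : PySem.Str.startswith k k = true := by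
  rw [PySem.Str.startswith_eq, PySem.Chars.startswith_iff]

-- A rank-0 candidate with index below every later index absorbs the rest of the fold.
theorem go0 (u : String) (x : Int × Int × String) (hx : x.1 = 0)
    (l : List (String × String)) (s : Int) (hs : x.2.1 < s) :
    List.foldl mstep (some x) (cands u l s) = some x := by
  induction l generalizing s with
  | nil => rfl
  | cons p rest ih =>
    obtain ⟨k, v⟩ := p
    rw [cands_cons]
    by_cases hsw : PySem.Str.startswith k u = true
    · rw [if_pos hsw, List.singleton_append, List.foldl_cons]
      have hkeep : mstep (some x) ((if k = u then (0 : Int) else 1), s, v) = some x := by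
        by_cases hk : k = u <;> simp [mstep, hk, hx, not_lt_of_gt hs]
      rw [hkeep]
      exact ih (s + 1) (by omega)
    · rw [if_neg hsw, List.nil_append]
      exact ih (s + 1) (by omega)

-- A rank-1 candidate is kept until the first exact match (rank 0) replaces it, which then absorbs.
theorem go1 (u : String) (x : Int × Int × String) (hx : x.1 = 1)
    (l : List (String × String)) (s : Int) (hs : x.2.1 < s) :
    (List.foldl mstep (some x) (cands u l s)).map (fun t => t.2.2) =
      some (((l.find? (fun p => p.1 == u)).map Prod.snd).getD x.2.2) := by
  induction l generalizing s x with
  | nil => rfl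
  | cons p rest ih =>
    obtain ⟨k, v⟩ := p
    rw [cands_cons]
    by_cases hk : k = u
    · subst hk
      rw [if_pos (startswith_self k), List.singleton_append, List.foldl_cons]
      have hrepl : mstep (some x) ((if k = k then (0 : Int) else 1), s, v) = some ((0 : Int), s, v) := by
        simp [mstep, hx]
      rw [hrepl, go0 k ((0 : Int), s, v) rfl rest (s + 1) (by show s < s + 1; omega)]
      simp [List.find?_cons_of_pos]
    · have hne : (k == u) = false := by simp [hk]
      by_cases hsw : PySem.Str.startswith k u = true
      · rw [if_pos hsw, List.singleton_append, List.foldl_cons]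
        have hkeep : mstep (some x) ((if k = u then (0 : Int) else 1), s, v) = some x := by
          simp [mstep, hk, hx, not_lt_of_gt hs]
        rw [hkeep, List.find?_cons_of_neg (by simp [hne])]
        exact ih x hx (s + 1) (by omega)
      · rw [if_neg hsw, List.nil_append, List.find?_cons_of_neg (by simp [hne])]
        exact ih x hx (s + 1) (by omega)

-- B's whole pass equals: value of the first exact match, else value of the first prefix match.
theorem main_fold (u : String) (l : List (String × String)) (s : Int) :
    (List.foldl mstep none (cands u l s)).map (fun t => t.2.2) =
      match l.find? (fun p => p.1 == u) with
      | some p => some p.2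
      | none => (l.find? (fun p => PySem.Str.startswith p.1 u)).map Prod.snd := by
  induction l generalizing s with
  | nil => rfl
  | cons p rest ih =>
    obtain ⟨k, v⟩ := p
    rw [cands_cons]
    by_cases hk : k = u
    · subst hk
      rw [if_pos (startswith_self k), List.singleton_append, List.foldl_cons]
      have h0 : mstep none ((if k = k then (0 : Int) else 1), s, v) = some ((0 : Int), s, v) := by
        simp [mstep]
      rw [h0, go0 k ((0 : Int), s, v) rfl rest (s + 1) (by show s < s + 1; omega)]
      simp [List.find?_cons_of_pos]
    · have hne : (k == u) = false := by simp [hk]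
      by_cases hsw : PySem.Str.startswith k u = true
      · rw [if_pos hsw, List.singleton_append, List.foldl_cons]
        have h1 : mstep none ((if k = u then (0 : Int) else 1), s, v) = some ((1 : Int), s, v) := by
          simp [mstep, hk]
        rw [h1, go1 u ((1 : Int), s, v) rfl rest (s + 1) (by show s < s + 1; omega)]
        have hswc : PySem.Chars.startswith k.toList u.toList = true := by simpa using hsw
        rw [List.find?_cons_of_neg (by simp [hne])]
        cases rest.find? (fun p => p.1 == u) <;> simp [hswc]
      · have hswb : PySem.Chars.startswith k.toList u.toList = false := by simpa using hsw
        rw [if_neg hsw, List.nil_append, ih (s + 1),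
            List.find?_cons_of_neg (by simp [hne]), List.find?_cons_of_neg (by simpa using hswb)]

-- A's prefix scan is the first prefix match (with "luan" as default).
theorem pyScanPrefix_eq (u : String) (l : List (String × String)) :
    pyScanPrefix u l = ((l.find? (fun p => PySem.Str.startswith p.1 u)).map Prod.snd).getD "luan" := by
  induction l with
  | nil => rfl
  | cons p rest ih =>
    obtain ⟨k, v⟩ := p
    by_cases hsw : PySem.Str.startswith k u = true
    · have hswc : PySem.Chars.startswith k.toList u.toList = true := by simpa using hsw
      simp [pyScanPrefix, hswc]

    · rw [List.find?_cons_of_neg (by simpa using hsw)]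
      simp only [pyScanPrefix, if_neg hsw, ih]

-- ===== VERDICT (by name: the statement is the Claim_ definition above) =====
theorem resolve_agent_name_spec : Claim_equal_resolve_agent_name := by
  intro u m _
  unfold Spec_resolve_agent_name resolve_agent_name resolve_agent_name_alt
  by_cases hu : u = ""
  · simp [hu]
  · simp only [if_neg hu]
    have hB : ((PySem.List.enumerate (PySem.Dict.ofList m).items 0).filterMap
        (fun p => if PySem.Str.startswith p.2.1 u
                  then some ((if p.2.1 = u then (0 : Int) else 1), p.1, p.2.2)
                  else none)) = cands u (PySem.Dict.ofList m).items 0 := rfl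
    rw [hB, min2?_eq_foldl]
    have hmain := main_fold u (PySem.Dict.ofList m).items 0
    have hget : PySem.Dict.get? (PySem.Dict.ofList m) u =
        ((PySem.Dict.ofList m).items.find? (fun p => p.1 == u)).map (fun x => x.2) := rfl
    have hBmatch : (match List.foldl mstep none (cands u (PySem.Dict.ofList m).items 0) with
        | some t => t.2.2 | none => "luan") =
        ((List.foldl mstep none (cands u (PySem.Dict.ofList m).items 0)).map (fun t => t.2.2)).getD "luan" := by
      cases List.foldl mstep none (cands u (PySem.Dict.ofList m).items 0) <;> rfl
    rw [hBmatch, hmain, hget, pyScanPrefix_eq]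
    cases hfe : (PySem.Dict.ofList m).items.find? (fun p => p.1 == u) with
    | some p => simp
    | none => cases (PySem.Dict.ofList m).items.find? (fun p => PySem.Str.startswith p.1 u) <;> simp
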